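-- pv_equiv track=rewrite | github.com/gnikolaropoulos/AdventOfCode2025 | day06/main.py | slices_from_separators
-- ===== SOURCE A (Python) =====
-- def slices_from_separators(seps, max_width):
--     slices, start = [], 0
--     for sep in seps:
--         if start < sep:
--             slices.append((start, sep))
--         start = sep + 1
--     if start < max_width:
--         slices.append((start, max_width))
--     return slices
-- ===== SOURCE B (Python) =====
-- def slices_from_separators(seps, max_width):
--     bounds = [-1] + list(seps) + [max_width]
--     return [(a + 1, b) for a, b in zip(bounds, bounds[1:]) if a + 1 < b]
-- ===== Notes on version B (the rewrite author's own statement) =====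
-- stated objective: simpler
-- what changed: Replaces the mutable running-start accumulator and trailing tail-append with a stateless pairwise pass over a sentinel-padded boundary list [-1]+seps+[max_width], emitting (a+1,b) for each adjacent pair with a+1 < b.
import Mathlib
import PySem

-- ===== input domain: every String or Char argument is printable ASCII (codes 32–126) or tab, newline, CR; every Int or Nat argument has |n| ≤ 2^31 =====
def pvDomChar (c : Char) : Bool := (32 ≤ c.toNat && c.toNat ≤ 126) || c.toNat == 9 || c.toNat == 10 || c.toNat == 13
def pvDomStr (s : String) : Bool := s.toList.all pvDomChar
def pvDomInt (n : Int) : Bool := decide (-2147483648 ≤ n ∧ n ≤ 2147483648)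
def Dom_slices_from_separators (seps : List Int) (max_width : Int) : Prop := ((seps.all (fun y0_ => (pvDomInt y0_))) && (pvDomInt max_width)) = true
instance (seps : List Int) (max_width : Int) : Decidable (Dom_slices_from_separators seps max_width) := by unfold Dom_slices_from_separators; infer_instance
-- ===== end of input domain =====

-- B replaces A's mutable running-start loop with a stateless pairwise pass over a sentinel-padded boundary list (objective: simpler).


-- ===== PORT A =====
-- literal transliteration: fold over seps with state (slices, start), then the tail append
def slices_from_separators (seps : List Int) (max_width : Int) : List (Int × Int) :=
  let p := seps.foldl
    (fun (st : List (Int × Int) × Int) sep =>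
      (if st.2 < sep then st.1 ++ [(st.2, sep)] else st.1, sep + 1))
    ([], 0)
  if p.2 < max_width then p.1 ++ [(p.2, max_width)] else p.1

-- ===== PORT B =====
-- literal transliteration of Source B: sentinel-padded bounds, pairwise comprehension over zip(bounds, bounds[1:])
def slices_from_separators_alt (seps : List Int) (max_width : Int) : List (Int × Int) :=
  let bounds : List Int := [-1] ++ seps ++ [max_width]
  (bounds.zip bounds.tail).filterMap
    (fun ab => if ab.1 + 1 < ab.2 then some (ab.1 + 1, ab.2) else none)

-- ===== PRECONDITION & SPEC =====
def Spec_slices_from_separators (seps : List Int) (max_width : Int) (out : List (Int × Int)) : Prop := out = slices_from_separators_alt seps max_width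
instance (seps : List Int) (max_width : Int) (out : List (Int × Int)) : Decidable (Spec_slices_from_separators seps max_width out) := by unfold Spec_slices_from_separators; infer_instance

-- ===== CLAIM (what is proved, stated in full; the proofs are below) =====
def Claim_equal_slices_from_separators : Prop := ∀ (seps : List Int) (max_width : Int), Dom_slices_from_separators seps max_width → Spec_slices_from_separators seps max_width (slices_from_separators seps max_width)

-- ===== LEMMAS AND PROOFS =====

-- Invariant: the loop started at `start` with accumulator `acc` equals `acc` followed by
-- B's pairwise pass over bounds whose first element is `start - 1`.
theorem sfs_key (seps : List Int) (mw start : Int) (acc : List (Int × Int)) :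
    (let p := seps.foldl
        (fun (st : List (Int × Int) × Int) sep =>
          (if st.2 < sep then st.1 ++ [(st.2, sep)] else st.1, sep + 1))
        (acc, start)
      if p.2 < mw then p.1 ++ [(p.2, mw)] else p.1)
    = acc ++ ((((start - 1) :: (seps ++ [mw])).zip (seps ++ [mw])).filterMap
        (fun ab => if ab.1 + 1 < ab.2 then some (ab.1 + 1, ab.2) else none)) := by
  induction seps generalizing start acc with
  | nil =>
      simp only [List.foldl_nil, List.nil_append, List.zip_cons_cons,
        List.filterMap_cons]
      have h : start - 1 + 1 = start := by omega
      rw [h]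
      split_ifs <;> simp
  | cons sep rest ih =>
      simp only [List.foldl_cons]
      rw [ih (sep + 1)]
      simp only [List.cons_append, List.zip_cons_cons, List.filterMap_cons]
      have h : start - 1 + 1 = start := by omega
      have h2 : sep + 1 - 1 = sep := by omega
      rw [h, h2]
      split_ifs <;> simp

-- ===== VERDICT (by name: the statement is the Claim_ definition above) =====
theorem slices_from_separators_spec : Claim_equal_slices_from_separators := by
  intro seps mw _
  unfold Spec_slices_from_separators slices_from_separators slices_from_separators_alt
  have := sfs_key seps mw 0 []
  simpa using this
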